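-- pv_equiv track=rewrite | github.com/adamewing/tebreak | tebreak/prefetch.py | disco_eval_strands
-- ===== SOURCE A (Python) =====
-- def disco_eval_strands(s):
--     left = 0
--     for i in range(1,len(s)):
--         if s[i] != s[0]:
--             left = i
--             break
--
--     right = 0
--     for i in range(len(s)-1, 0, -1):
--         if s[i] != s[-1]:
--             right = i+1
--             break
--
--     if left == right:
--         return left
--
--     return 0
-- ===== SOURCE B (Python) =====
-- def disco_eval_strands(s):
--     # Single forward pass tracking both boundaries at once.
--     left = 0
--     last_diff = None
--     for i in range(1, len(s)):
--         if left == 0 and s[i] != s[0]: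
--             left = i
--         if s[i] != s[-1]:
--             last_diff = i
--     right = 0 if last_diff is None else last_diff + 1
--     return left if left == right else 0
-- ===== Notes on version B (the rewrite author's own statement) =====
-- stated objective: alternative
-- what changed: A's two scans (forward for the first index differing from s[0], backward for the last index differing from s[-1]) are merged into one forward pass that tracks both boundaries simultaneously.
import Mathlib
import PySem

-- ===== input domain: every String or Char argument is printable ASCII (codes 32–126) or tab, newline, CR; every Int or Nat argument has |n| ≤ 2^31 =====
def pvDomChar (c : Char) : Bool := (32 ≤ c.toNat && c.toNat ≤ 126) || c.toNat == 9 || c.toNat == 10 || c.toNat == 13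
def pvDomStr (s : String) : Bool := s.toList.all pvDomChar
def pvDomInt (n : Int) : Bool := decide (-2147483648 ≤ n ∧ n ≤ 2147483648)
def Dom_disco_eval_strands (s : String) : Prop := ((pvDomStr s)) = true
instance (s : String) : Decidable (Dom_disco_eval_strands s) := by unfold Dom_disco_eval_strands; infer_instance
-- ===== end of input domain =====

-- B replaces A's forward scan plus separate backward scan by one forward pass that
-- tracks the first index differing from s[0] and the last index differing from s[-1]
-- (objective: alternative single-pass decomposition, same O(n) cost).

-- ===== PORT A =====
-- first loop of A: 'for i in range(1,len(s)): if s[i] != s[0]: left = i; break'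
def pvALeft (cs : List Char) : List Int → Int
  | [] => 0
  | i :: rest =>
      if PySem.List.pyGetD cs i ' ' ≠ PySem.List.pyGetD cs 0 ' ' then i else pvALeft cs rest

-- second loop of A: 'for i in range(len(s)-1, 0, -1): if s[i] != s[-1]: right = i+1; break'
def pvARight (cs : List Char) : List Int → Int
  | [] => 0
  | i :: rest =>
      if PySem.List.pyGetD cs i ' ' ≠ PySem.List.pyGetD cs (-1) ' ' then i + 1 else pvARight cs rest

def disco_eval_strands (s : String) : Int :=
  let cs := s.toList
  let left := pvALeft cs (PySem.List.pyRange 1 (PySem.Str.len s) 1)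
  let right := pvARight cs (PySem.List.pyRange (PySem.Str.len s - 1) 0 (-1))
  if left = right then left else 0

-- ===== PORT B =====
-- one iteration of B's single loop: state = (left, last_diff)
def pvBStep (cs : List Char) (st : Int × Option Int) (i : Int) : Int × Option Int :=
  ( if st.1 = 0 ∧ PySem.List.pyGetD cs i ' ' ≠ PySem.List.pyGetD cs 0 ' ' then i else st.1,
    if PySem.List.pyGetD cs i ' ' ≠ PySem.List.pyGetD cs (-1) ' ' then some i else st.2 )

def disco_eval_strands_alt (s : String) : Int :=
  let cs := s.toList
  let st := (PySem.List.pyRange 1 (PySem.Str.len s) 1).foldl (pvBStep cs) (0, none)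
  let right : Int := match st.2 with | none => 0 | some j => j + 1
  if st.1 = right then st.1 else 0

-- ===== PRECONDITION & SPEC =====
def Spec_disco_eval_strands (s : String) (out : Int) : Prop := out = disco_eval_strands_alt s
instance (s : String) (out : Int) : Decidable (Spec_disco_eval_strands s out) := by unfold Spec_disco_eval_strands; infer_instance

-- ===== CLAIM (what is proved, stated in full; the proofs are below) =====
def Claim_equal_disco_eval_strands : Prop := ∀ (s : String), Dom_disco_eval_strands s → Spec_disco_eval_strands s (disco_eval_strands s)

-- ===== LEMMAS AND PROOFS =====

-- the two independent components of B's fold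
def pvFL (cs : List Char) (a : Int) (i : Int) : Int :=
  if a = 0 ∧ PySem.List.pyGetD cs i ' ' ≠ PySem.List.pyGetD cs 0 ' ' then i else a

def pvFR (cs : List Char) (o : Option Int) (i : Int) : Option Int :=
  if PySem.List.pyGetD cs i ' ' ≠ PySem.List.pyGetD cs (-1) ' ' then some i else o

-- first hit of the right-scan predicate, as an Option
def pvFind (cs : List Char) : List Int → Option Int
  | [] => none
  | i :: rest =>
      if PySem.List.pyGetD cs i ' ' ≠ PySem.List.pyGetD cs (-1) ' ' then some i else pvFind cs rest

lemma pvBStep_split (cs : List Char) (l : List Int) (a : Int) (o : Option Int) :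
    l.foldl (pvBStep cs) (a, o) = (l.foldl (pvFL cs) a, l.foldl (pvFR cs) o) := by
  induction l generalizing a o with
  | nil => rfl
  | cons i t ih => simp [List.foldl, pvBStep, pvFL, pvFR, ih]

lemma pvFL_stable (cs : List Char) (l : List Int) (a : Int) (ha : a ≠ 0) :
    l.foldl (pvFL cs) a = a := by
  induction l with
  | nil => rfl
  | cons i t ih => simp [List.foldl, pvFL, ha, ih]

lemma pvALeft_eq_foldl (cs : List Char) (l : List Int) (hl : ∀ i ∈ l, i ≠ 0) :
    pvALeft cs l = l.foldl (pvFL cs) 0 := by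
  induction l with
  | nil => rfl
  | cons i t ih =>
      by_cases h : PySem.List.pyGetD cs i ' ' ≠ PySem.List.pyGetD cs 0 ' '
      · simp [pvALeft, List.foldl, pvFL, h,
          pvFL_stable cs t i (hl i (by simp))]
      · simp only [pvALeft, List.foldl, pvFL, h, and_false, if_false]
        exact ih (fun j hj => hl j (by simp [hj]))

lemma pvFind_append (cs : List Char) (xs ys : List Int) :
    pvFind cs (xs ++ ys) = (pvFind cs xs).orElse (fun _ => pvFind cs ys) := by
  induction xs with
  | nil => rfl
  | cons i t ih =>
      by_cases h : PySem.List.pyGetD cs i ' ' ≠ PySem.List.pyGetD cs (-1) ' '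
      · simp [pvFind, h]
      · simp [pvFind, h, ih]

lemma pvFR_eq_find_reverse (cs : List Char) (l : List Int) (o : Option Int) :
    l.foldl (pvFR cs) o = ((pvFind cs l.reverse).orElse (fun _ => o)) := by
  induction l generalizing o with
  | nil => rfl
  | cons i t ih =>
      simp only [List.foldl, List.reverse_cons, pvFind_append cs t.reverse [i], ih]
      cases hf : pvFind cs t.reverse with
      | some j => rfl
      | none =>
          by_cases h : PySem.List.pyGetD cs i ' ' ≠ PySem.List.pyGetD cs (-1) ' ' <;>
            simp [pvFind, pvFR, h, Option.orElse]

lemma pvARight_eq_find (cs : List Char) (l : List Int) :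
    pvARight cs l = (match pvFind cs l with | none => 0 | some j => j + 1) := by
  induction l with
  | nil => rfl
  | cons i t ih =>
      by_cases h : PySem.List.pyGetD cs i ' ' ≠ PySem.List.pyGetD cs (-1) ' '
      · simp [pvARight, pvFind, h]
      · simp [pvARight, pvFind, h, ih]

lemma pvRange_rev (n : Int) :
    PySem.List.pyRange (n - 1) 0 (-1) = (PySem.List.pyRange 1 n 1).reverse := by
  have h : PySem.List.pyRange (n - 1) 0 (-1)
      = (PySem.List.pyRange (0 + 1) ((n - 1) + 1) 1).reverse :=
    PySem.List.pyRange_neg_one_eq_reverse (n - 1) 0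
  have h2 : (0 : Int) + 1 = 1 := by ring
  have h3 : (n - 1) + 1 = n := by ring
  rw [h, h2, h3]

-- ===== VERDICT (by name: the statement is the Claim_ definition above) =====
theorem disco_eval_strands_spec : Claim_equal_disco_eval_strands := by
  intro s _
  unfold Spec_disco_eval_strands disco_eval_strands disco_eval_strands_alt
  simp only [pvBStep_split]
  rw [pvALeft_eq_foldl s.toList _ (by
    intro i hi
    have := (PySem.List.mem_pyRange_one).mp hi
    omega)]
  rw [pvRange_rev, pvARight_eq_find, pvFR_eq_find_reverse]
  cases pvFind s.toList (PySem.List.pyRange 1 (PySem.Str.len s) 1).reverse <;> rfl
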